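-- pv_equiv track=rewrite | github.com/teachingai/full-stack-skills | skills/ddd4j-project-builder/scripts/check_project.py | _identify_architecture_from_modules
-- ===== SOURCE A (Python) =====
-- from typing import Dict, List, Optional, Tuple
--
-- def _identify_architecture_from_modules(module_names: List[str]) -> str:
--     """Identify architecture from module names"""
--     if any("adapter" in name and "app" in name for name in module_names):
--         return "cola-v5"
--     elif any("adapter" in name for name in module_names):
--         return "hexagonal"
--     elif any("interfaces" in name or "application" in name for name in module_names):
--         return "ddd-classic"
--     else:
--         return "unknown"
-- ===== SOURCE B (Python) =====
-- _LABELS = ("unknown", "ddd-classic", "hexagonal", "cola-v5")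
--
-- def _rank(name):
--     """Numeric specificity rank of one module name."""
--     if "adapter" in name:
--         return 3 if "app" in name else 2
--     return 1 if ("interfaces" in name or "application" in name) else 0
--
-- def _identify_architecture_from_modules(module_names):
--     """Identify architecture by ranking each module name and taking the maximum rank."""
--     return _LABELS[max(map(_rank, module_names), default=0)]
-- ===== Notes on version B (the rewrite author's own statement) =====
-- stated objective: alternative
-- what changed: Instead of staged any() scans in priority order, B maps each module name to a numeric specificity rank (3/2/1/0), reduces with max (default 0), and indexes a label table with the result.
import Mathlib
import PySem

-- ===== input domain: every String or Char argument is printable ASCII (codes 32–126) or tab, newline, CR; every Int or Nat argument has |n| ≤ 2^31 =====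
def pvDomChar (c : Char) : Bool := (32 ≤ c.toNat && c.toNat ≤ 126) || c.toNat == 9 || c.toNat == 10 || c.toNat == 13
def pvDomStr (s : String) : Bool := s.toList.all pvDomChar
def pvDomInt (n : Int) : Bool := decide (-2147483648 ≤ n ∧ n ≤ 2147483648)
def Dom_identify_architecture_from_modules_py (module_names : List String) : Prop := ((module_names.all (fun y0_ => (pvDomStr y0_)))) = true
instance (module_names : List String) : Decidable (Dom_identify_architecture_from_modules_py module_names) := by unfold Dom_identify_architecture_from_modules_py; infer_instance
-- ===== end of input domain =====

-- B ranks each module name numerically (3/2/1/0), reduces with max and indexes a label table,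
-- instead of A's staged any() scans; alternative decomposition, same cost.
-- ===== PORT A =====
def identify_architecture_from_modules_py (module_names : List String) : String :=
  if module_names.any (fun name => PySem.Str.isIn "adapter" name && PySem.Str.isIn "app" name) then
    "cola-v5"
  else if module_names.any (fun name => PySem.Str.isIn "adapter" name) then
    "hexagonal"
  else if module_names.any (fun name => PySem.Str.isIn "interfaces" name || PySem.Str.isIn "application" name) then
    "ddd-classic"
  else
    "unknown"

-- ===== PORT B =====
def pvLabels : List String := ["unknown", "ddd-classic", "hexagonal", "cola-v5"]

def pvRank (name : String) : Nat :=
  if PySem.Str.isIn "adapter" name then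
    (if PySem.Str.isIn "app" name then 3 else 2)
  else if PySem.Str.isIn "interfaces" name || PySem.Str.isIn "application" name then 1
  else 0

def identify_architecture_from_modules_py_alt (module_names : List String) : String :=
  -- max(map(_rank, …), default=0); tuple index is always in range since ranks are ≤ 3
  pvLabels.getD ((module_names.map pvRank).foldl Nat.max 0) "unknown"

-- ===== PRECONDITION & SPEC =====
def Spec_identify_architecture_from_modules_py (module_names : List String) (out : String) : Prop := out = identify_architecture_from_modules_py_alt module_names
instance (module_names : List String) (out : String) : Decidable (Spec_identify_architecture_from_modules_py module_names out) := by unfold Spec_identify_architecture_from_modules_py; infer_instance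

-- ===== CLAIM (what is proved, stated in full; the proofs are below) =====
def Claim_equal_identify_architecture_from_modules_py : Prop := ∀ (module_names : List String), Dom_identify_architecture_from_modules_py module_names → Spec_identify_architecture_from_modules_py module_names (identify_architecture_from_modules_py module_names)

-- ===== LEMMAS AND PROOFS =====

lemma pv_foldl_max (xs : List Nat) (a : Nat) :
    xs.foldl Nat.max a = Nat.max a (xs.foldl Nat.max 0) := by
  induction xs generalizing a with
  | nil => simp
  | cons x xs ih =>
    simp only [List.foldl_cons, Nat.zero_max]
    rw [ih, ih x]
    exact Nat.max_assoc a x _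

-- the maximal rank equals A's priority decision, numerically
lemma pv_max_rank (xs : List String) :
    (xs.map pvRank).foldl Nat.max 0 =
      (if xs.any (fun name => PySem.Str.isIn "adapter" name && PySem.Str.isIn "app" name) then 3
       else if xs.any (fun name => PySem.Str.isIn "adapter" name) then 2
       else if xs.any (fun name => PySem.Str.isIn "interfaces" name || PySem.Str.isIn "application" name) then 1
       else 0) := by
  induction xs with
  | nil => simp
  | cons x xs ih =>
    simp only [List.map_cons, List.foldl_cons, List.any_cons]
    rw [pv_foldl_max, ih]
    unfold pvRank
    rcases Bool.eq_false_or_eq_true (PySem.Str.isIn "adapter" x) with h1 | h1 <;>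
    rcases Bool.eq_false_or_eq_true (PySem.Str.isIn "app" x) with h2 | h2 <;>
    rcases Bool.eq_false_or_eq_true (PySem.Str.isIn "interfaces" x || PySem.Str.isIn "application" x) with h3 | h3 <;>
      simp only [h1, h2, h3, Bool.true_or, Bool.false_or, Bool.and_true,
        Bool.and_false, if_true, if_false, Bool.false_eq_true] <;>
      split_ifs <;> decide

-- ===== VERDICT (by name: the statement is the Claim_ definition above) =====
theorem identify_architecture_from_modules_py_spec : Claim_equal_identify_architecture_from_modules_py := by
  intro module_names _
  unfold Spec_identify_architecture_from_modules_py
  unfold identify_architecture_from_modules_py identify_architecture_from_modules_py_alt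
  rw [pv_max_rank]
  split_ifs <;> rfl
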